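-- pv_equiv track=rewrite | github.com/ohndz/scraperone | scrapers/superpages_labs.py | pick_best_email
-- ===== SOURCE A (Python) =====
-- def normalize_email(email: str) -> str:
--     return email.strip().strip(".,;:()[]{}<>\"'").lower()
--
-- def pick_best_email(emails: list[str]) -> str:
--     if not emails:
--         return ""
--     seen = set()
--     uniq = []
--     for e in emails:
--         e2 = normalize_email(e)
--         if e2 and e2 not in seen:
--             seen.add(e2)
--             uniq.append(e2)
--
--     priority = ["info@", "contact", "ventas@", "admin@", "administracion@", "hello@"]
--     for p in priority:
--         for e in uniq:
--             if p in e: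
--                 return e
--     return uniq[0] if uniq else ""
-- ===== SOURCE B (Python) =====
-- def normalize_email(email: str) -> str:
--     return email.strip().strip(".,;:()[]{}<>\"'").lower()
--
-- PRIORITY = ["info@", "contact", "ventas@", "admin@", "administracion@", "hello@"]
--
-- def pick_best_email(emails: list[str]) -> str:
--     # One streaming pass: keep the first email achieving the strictly best (lowest)
--     # priority rank seen so far.  No seen-set / uniq list is needed: a later duplicate
--     # has the same rank as its first occurrence and never strictly improves.
--     best, best_rank = "", len(PRIORITY) + 1  # sentinel rank worse than "no match"
--     for raw in emails:
--         e = normalize_email(raw)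
--         if not e:
--             continue
--         rank = next((i for i, p in enumerate(PRIORITY) if p in e), len(PRIORITY))
--         if rank < best_rank:
--             best, best_rank = e, rank
--     return best
-- ===== Notes on version B (the rewrite author's own statement) =====
-- stated objective: alternative
-- what changed: A stages a seen-set dedup pass building a uniq list and then a priority-by-priority nested rescan of it; B is a single streaming pass over the raw emails keeping only (best, best_rank) with strict improvement, dropping both the seen set and the uniq list (duplicates can never strictly improve, so dedup is unnecessary).
import Mathlib
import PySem

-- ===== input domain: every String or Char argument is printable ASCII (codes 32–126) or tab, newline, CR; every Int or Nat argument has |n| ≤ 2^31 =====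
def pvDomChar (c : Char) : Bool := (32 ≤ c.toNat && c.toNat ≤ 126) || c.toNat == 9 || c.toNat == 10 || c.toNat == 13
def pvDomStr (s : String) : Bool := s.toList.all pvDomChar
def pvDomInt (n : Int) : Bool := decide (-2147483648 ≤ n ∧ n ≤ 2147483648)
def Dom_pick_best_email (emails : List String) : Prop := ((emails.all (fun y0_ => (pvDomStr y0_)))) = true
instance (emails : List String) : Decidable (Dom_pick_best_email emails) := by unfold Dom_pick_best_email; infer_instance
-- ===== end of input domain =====

-- B replaces A's staged seen-set dedup + nested priority-by-priority rescan with a single streaming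
-- pass keeping only (best, best_rank) with strict improvement (no seen set, no uniq list); objective: alternative.

-- ===== PORT A =====
def normalize_email (email : String) : String :=
  PySem.Str.lower (PySem.Str.stripChars (PySem.Str.strip email) ".,;:()[]{}<>\"'")

def pick_best_email (emails : List String) : String :=
  if emails = [] then ""
  else
    let st := emails.foldl (fun (st : PySem.Set String × List String) e =>
      let e2 := normalize_email e
      if e2 != "" && !(PySem.Set.contains st.1 e2) then (PySem.Set.add st.1 e2, st.2 ++ [e2])
      else st) (PySem.Set.empty, [])
    let uniq := st.2
    let priority := ["info@", "contact", "ventas@", "admin@", "administracion@", "hello@"]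
    match priority.findSome? (fun p => uniq.find? (fun e => PySem.Str.isIn p e)) with
    | some e => e
    | none => uniq.headD ""

-- ===== PORT B =====
def pvPriority : List String := ["info@", "contact", "ventas@", "admin@", "administracion@", "hello@"]

def pick_best_email_alt (emails : List String) : String :=
  let st := emails.foldl (fun (st : String × Nat) raw =>
      let e := normalize_email raw
      if e = "" then st
      else
        -- next((i for i,p in enumerate(PRIORITY) if p in e), len(PRIORITY)) = findIdx
        let rank := pvPriority.findIdx (fun p => PySem.Str.isIn p e)
        if rank < st.2 then (e, rank) else st)
    ("", pvPriority.length + 1)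
  st.1

-- ===== PRECONDITION & SPEC =====
def Spec_pick_best_email (emails : List String) (out : String) : Prop := out = pick_best_email_alt emails
instance (emails : List String) (out : String) : Decidable (Spec_pick_best_email emails out) := by unfold Spec_pick_best_email; infer_instance

-- ===== CLAIM (what is proved, stated in full; the proofs are below) =====
def Claim_equal_pick_best_email : Prop := ∀ (emails : List String), Dom_pick_best_email emails → Spec_pick_best_email emails (pick_best_email emails)

-- ===== LEMMAS AND PROOFS =====

-- the one-element step of "first element with minimal key", as an Option-valued fold
def pvStep (key : String → Nat) (acc : Option String) (x : String) : Option String :=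
  match acc with
  | none => some x
  | some m => if key x < key m then some x else some m

-- a 0-key accumulator is never displaced (keys are Nat)
theorem pv_absorb (key : String → Nat) (t : List String) (m : String) (hm : key m = 0) :
    t.foldl (pvStep key) (some m) = some m := by
  induction t with
  | nil => rfl
  | cons y t ih => simp [pvStep, hm, ih]

-- the first element of key 0, after a prefix of nonzero keys, wins the fold
theorem pv_first_zero (key : String → Nat) (e0 : String) (he : key e0 = 0) (suf : List String) :
    ∀ (pre : List String) (acc : Option String),
      (∀ m, acc = some m → key m ≠ 0) → (∀ y ∈ pre, key y ≠ 0) →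
      (pre ++ e0 :: suf).foldl (pvStep key) acc = some e0 := by
  intro pre
  induction pre with
  | nil =>
    intro acc hacc _
    cases acc with
    | none => simpa [pvStep] using pv_absorb key suf e0 he
    | some m =>
      have hm := hacc m rfl
      have hlt : key e0 < key m := by omega
      simpa [pvStep, hlt] using pv_absorb key suf e0 he
  | cons y pre ih =>
    intro acc hacc hpre
    have hy : key y ≠ 0 := hpre y (by simp)
    cases acc with
    | none =>
      simpa [pvStep] using ih (some y) (by intro m hm; cases hm; exact hy)
        (fun z hz => hpre z (by simp [hz]))
    | some m =>
      have hm := hacc m rfl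
      by_cases h : key y < key m
      · simpa [pvStep, h] using ih (some y) (by intro z hz; cases hz; exact hy)
          (fun z hz => hpre z (by simp [hz]))
      · simpa [pvStep, h] using ih (some m) (by intro z hz; cases hz; exact hm)
          (fun z hz => hpre z (by simp [hz]))

-- shifting every key by +1 does not change the fold
theorem pv_shift (key key' : String → Nat) :
    ∀ (u : List String) (acc : Option String),
      (∀ y ∈ u, key y = key' y + 1) → (∀ m, acc = some m → key m = key' m + 1) →
      u.foldl (pvStep key) acc = u.foldl (pvStep key') acc := by
  intro u
  induction u with
  | nil => intro acc _ _; rfl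
  | cons y t ih =>
    intro acc hu hacc
    have hy : key y = key' y + 1 := hu y (by simp)
    cases acc with
    | none =>
      simp only [List.foldl_cons, pvStep]
      exact ih (some y) (fun z hz => hu z (by simp [hz])) (by intro z hz; cases hz; exact hy)
    | some m =>
      have hm := hacc m rfl
      have hiff : (key y < key m) ↔ (key' y < key' m) := by omega
      by_cases h : key' y < key' m
      · simp only [List.foldl_cons, pvStep, if_pos (hiff.mpr h), if_pos h]
        exact ih (some y) (fun z hz => hu z (by simp [hz])) (by intro z hz; cases hz; exact hy)
      · simp only [List.foldl_cons, pvStep, if_neg (fun hh => h (hiff.mp hh)), if_neg h]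
        exact ih (some m) (fun z hz => hu z (by simp [hz])) (by intro z hz; cases hz; exact hm)

-- A's priority-by-priority scan equals "first element with minimal rank", for any containment test c
theorem pv_scan_eq_min (c : String → String → Bool) (x : String) (t : List String) :
    ∀ ps : List String,
      (match ps.findSome? (fun p => (x :: t).find? (fun e => c p e)) with
       | some e => e
       | none => (x :: t).headD "") =
      ((x :: t).foldl (pvStep (fun e => ps.findIdx (fun p => c p e))) none).getD "" := by
  intro ps
  induction ps with
  | nil =>
    rw [List.foldl_cons]
    have h1 : pvStep (fun e => ([] : List String).findIdx (fun p => c p e)) none x = some x := rfl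
    rw [h1, pv_absorb _ t x (by simp)]
    simp
  | cons p ps ih =>
    rcases h : (x :: t).find? (fun e => c p e) with _ | e0
    · have hnone : ∀ y ∈ x :: t, c p y = false := by
        intro y hy
        simpa using List.find?_eq_none.mp h y hy
      have hkey : ∀ y ∈ x :: t,
          (fun e => (p :: ps).findIdx (fun q => c q e)) y =
          (fun e => ps.findIdx (fun q => c q e)) y + 1 := by
        intro y hy
        simp [List.findIdx_cons, hnone y hy]
      rw [pv_shift _ _ (x :: t) none hkey (by intro m hm; cases hm)]
      rw [List.findSome?_cons, h]
      exact ih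
    · obtain ⟨hin, pre, suf, hsplit, hpre⟩ := List.find?_eq_some_iff_append.mp h
      have hmin : (x :: t).foldl
          (pvStep (fun e => (p :: ps).findIdx (fun q => c q e))) none = some e0 := by
        rw [hsplit]
        apply pv_first_zero _ e0 (by simp [List.findIdx_cons, hin]) suf pre none
          (by intro m hm; cases hm)
        intro y hy
        have hy' : c p y = false := by simpa using hpre y hy
        simp [List.findIdx_cons, hy']
      rw [List.findSome?_cons, h, hmin]
      rfl

-- A's dedup fold keeps seen and uniq equal as lists; the result is Set.update of the filtered map
theorem pv_dedup_fold (es : List String) :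
    ∀ (u : List String),
      es.foldl (fun (st : PySem.Set String × List String) e =>
        let e2 := normalize_email e
        if e2 != "" && !(PySem.Set.contains st.1 e2) then (PySem.Set.add st.1 e2, st.2 ++ [e2])
        else st) (u, u) =
      (PySem.Set.update u ((es.map normalize_email).filter (fun s => s != "")),
       PySem.Set.update u ((es.map normalize_email).filter (fun s => s != ""))) := by
  induction es with
  | nil => intro u; simp [PySem.Set.update]
  | cons e es ih =>
    intro u
    by_cases h1 : normalize_email e = ""
    · simpa [h1] using ih u
    · by_cases h2 : normalize_email e ∈ u
      · have hadd : PySem.Set.add u (normalize_email e) = u := by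
          simp [PySem.Set.add, h2]
        simpa [h1, h2, PySem.Set.update, hadd] using ih u
      · have hadd : PySem.Set.add u (normalize_email e) = u ++ [normalize_email e] := by
          simp [PySem.Set.add, h2]
        simpa [h1, h2, PySem.Set.update, hadd] using ih (u ++ [normalize_email e])

-- dedup relative to an already-seen list (dd [] xs = dict.fromkeys order)
def pvDd (seen : List String) : List String → List String
  | [] => []
  | x :: t => if x ∈ seen then pvDd seen t else x :: pvDd (seen ++ [x]) t

theorem pv_ofList_eq_dd (xs : List String) :
    ∀ s : List String, xs.foldl PySem.Set.add s = s ++ pvDd s xs := by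
  induction xs with
  | nil => intro s; simp [pvDd]
  | cons x t ih =>
    intro s
    by_cases h : x ∈ s
    · have : PySem.Set.add s x = s := by simp [PySem.Set.add, h]
      simp [pvDd, h, ih s]
    · have : PySem.Set.add s x = s ++ [x] := by simp [PySem.Set.add, h]
      simp [pvDd, h, ih (s ++ [x])]

-- skipping later duplicates does not change the min-fold: the accumulator already dominates them
theorem pv_fold_dd (key : String → Nat) :
    ∀ (xs seen : List String) (acc : Option String),
      (∀ y ∈ seen, ∃ m, acc = some m ∧ key m ≤ key y) →
      xs.foldl (pvStep key) acc = (pvDd seen xs).foldl (pvStep key) acc := by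
  intro xs
  induction xs with
  | nil => intro seen acc _; rfl
  | cons x t ih =>
    intro seen acc hseen
    by_cases hx : x ∈ seen
    · obtain ⟨m, hm, hle⟩ := hseen x hx
      have hstep : pvStep key acc x = acc := by
        subst hm; simp [pvStep]; omega
      simp only [pvDd, if_pos hx, List.foldl_cons, hstep]
      exact ih seen acc hseen
    · simp only [pvDd, if_neg hx, List.foldl_cons]
      apply ih (seen ++ [x]) (pvStep key acc x)
      intro y hy
      rcases List.mem_append.mp hy with hy | hy
      · obtain ⟨m, hm, hle⟩ := hseen y hy
        subst hm
        by_cases h : key x < key m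
        · exact ⟨x, by simp [pvStep, h], by omega⟩
        · exact ⟨m, by simp [pvStep, h], hle⟩
      · have hxy : y = x := by simpa using hy
        subst hxy
        cases acc with
        | none => exact ⟨y, rfl, le_refl _⟩
        | some m =>
          by_cases h : key y < key m
          · exact ⟨y, by simp [pvStep, h], le_refl _⟩
          · exact ⟨m, by simp [pvStep, h], by omega⟩

-- B's pair fold from an occupied accumulator tracks the Option fold
theorem pv_pair_fold (key : String → Nat) :
    ∀ (t : List String) (m : String),
      ∃ r, t.foldl (pvStep key) (some m) = some r ∧
        t.foldl (fun (st : String × Nat) x => if key x < st.2 then (x, key x) else st) (m, key m)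
          = (r, key r) := by
  intro t
  induction t with
  | nil => intro m; exact ⟨m, rfl, rfl⟩
  | cons y t ih =>
    intro m
    by_cases h : key y < key m
    · obtain ⟨r, h1, h2⟩ := ih y
      exact ⟨r, by simpa [pvStep, h] using h1, by simpa [h] using h2⟩
    · obtain ⟨r, h1, h2⟩ := ih m
      exact ⟨r, by simpa [pvStep, h] using h1, by simpa [h] using h2⟩

-- the rank key both ports use
def pvKey (e : String) : Nat := pvPriority.findIdx (fun p => PySem.Str.isIn p e)

-- B's fold over the raw emails equals the pure fold over the filtered normalized list
theorem pv_filter_fold (es : List String) :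
    ∀ (acc : String × Nat),
      es.foldl (fun (st : String × Nat) raw =>
        let e := normalize_email raw
        if e = "" then st
        else
          let rank := pvPriority.findIdx (fun p => PySem.Str.isIn p e)
          if rank < st.2 then (e, rank) else st) acc =
      ((es.map normalize_email).filter (fun s => s != "")).foldl
        (fun (st : String × Nat) x => if pvKey x < st.2 then (x, pvKey x) else st) acc := by
  induction es with
  | nil => intro acc; simp only [List.map_nil, List.filter_nil, List.foldl_nil]
  | cons e es ih =>
    intro acc
    simp only [List.foldl_cons, List.map_cons, List.filter_cons]
    by_cases h : normalize_email e = ""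
    · have hb : (normalize_email e != "") = false := by simp [h]
      rw [hb]
      simpa [h] using ih acc
    · have hb : (normalize_email e != "") = true := by simp [h]
      rw [hb]
      simp only [if_neg h]
      exact ih _

-- B's result, in Option-fold form
theorem pv_B_eq_min (es : List String) :
    pick_best_email_alt es =
      (((es.map normalize_email).filter (fun s => s != "")).foldl (pvStep pvKey) none).getD "" := by
  unfold pick_best_email_alt
  rw [pv_filter_fold es ("", pvPriority.length + 1)]
  cases hx : (es.map normalize_email).filter (fun s => s != "") with
  | nil => simp only [List.foldl_nil]; rfl
  | cons x t =>
    have hlt : pvKey x < pvPriority.length + 1 :=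
      Nat.lt_succ_of_le List.findIdx_le_length
    obtain ⟨r, h1, h2⟩ := pv_pair_fold pvKey t x
    simp only [List.foldl_cons, if_pos hlt, h2, pvStep, h1, Option.getD_some]

-- A's result, in the same Option-fold form
theorem pv_A_eq_min (es : List String) :
    pick_best_email es =
      (((es.map normalize_email).filter (fun s => s != "")).foldl (pvStep pvKey) none).getD "" := by
  unfold pick_best_email
  by_cases hemp : es = []
  · subst hemp; rfl
  · simp only [if_neg hemp]
    rw [show (PySem.Set.empty : PySem.Set String) = ([] : List String) from rfl,
      pv_dedup_fold es []]
    generalize (es.map normalize_email).filter (fun s => s != "") = xs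
    have huniq : PySem.Set.update ([] : List String) xs = pvDd [] xs := by
      simpa [PySem.Set.update] using pv_ofList_eq_dd xs []
    rw [huniq, pv_fold_dd pvKey xs [] none (by intro y hy; simp at hy)]
    rcases hu : pvDd [] xs with _ | ⟨x, t⟩
    · simp
    · show (match pvPriority.findSome? (fun p => (x :: t).find? (fun e => PySem.Str.isIn p e)) with
            | some e => e
            | none => (x :: t).headD "") =
          ((x :: t).foldl (pvStep (fun e => pvPriority.findIdx (fun p => PySem.Str.isIn p e))) none).getD ""
      exact pv_scan_eq_min (fun p e => PySem.Str.isIn p e) x t pvPriority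

-- ===== VERDICT (by name: the statement is the Claim_ definition above) =====
theorem pick_best_email_spec : Claim_equal_pick_best_email := by
  intro emails _
  unfold Spec_pick_best_email
  rw [pv_A_eq_min, pv_B_eq_min]
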